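-- pv_equiv track=rewrite | github.com/shanayatunk/Feelori-WhatsApp-Chatz | backend/app/server.py | _identify_search_category
-- ===== SOURCE A (Python) =====
-- from typing import Optional, List, Dict, Any, Annotated, Tuple, Set, Union
--
-- def _identify_search_category(keywords: List[str]) -> str:
--     """
--     Prefer specific product categories (bangles, earrings, rings, etc.)
--     over generic set/matching terms. Only return 'sets' when no specific
--     category is present.
--     """
--     specific = {
--         "bangles": {"bangle", "bangles", "kada", "kadaa"},
--         "bracelets": {"bracelet", "bracelets"},
--         "rings": {"ring", "rings"},
--         "necklaces": {"necklace", "necklaces", "haram", "choker", "mala"},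
--         "earrings": {"earring", "earrings", "jhumka", "jhumkas", "stud", "studs"},
--         "anklets": {"anklet", "anklets", "payal", "paayal"},
--         "hair_extensions": {"hair extension", "hair extensions", "hair extn"},
--     }
--
--     generic_sets = {"set", "sets", "matching", "combo", "pair"}
--
--     for cat, terms in specific.items():
--         if any(w in terms for w in keywords):
--             return cat
--
--     if any(w in generic_sets for w in keywords):
--         return "sets"
--
--     return "unknown"
-- ===== SOURCE B (Python) =====
-- from typing import Optional, List, Dict, Any, Annotated, Tuple, Set, Union
--
-- _CAT_NAMES = ["bangles", "bracelets", "rings", "necklaces", "earrings",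
--               "anklets", "hair_extensions", "sets"]
--
-- _TERM_RANK = {
--     "bangle": 0, "bangles": 0, "kada": 0, "kadaa": 0,
--     "bracelet": 1, "bracelets": 1,
--     "ring": 2, "rings": 2,
--     "necklace": 3, "necklaces": 3, "haram": 3, "choker": 3, "mala": 3,
--     "earring": 4, "earrings": 4, "jhumka": 4, "jhumkas": 4, "stud": 4, "studs": 4,
--     "anklet": 5, "anklets": 5, "payal": 5, "paayal": 5,
--     "hair extension": 6, "hair extensions": 6, "hair extn": 6,
--     "set": 7, "sets": 7, "matching": 7, "combo": 7, "pair": 7,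
-- }
--
--
-- def _identify_search_category(keywords: List[str]) -> str:
--     best = None
--     for w in keywords:
--         r = _TERM_RANK.get(w)
--         if r is not None and (best is None or r < best):
--             best = r
--     return _CAT_NAMES[best] if best is not None else "unknown"
-- ===== Notes on version B (the rewrite author's own statement) =====
-- stated objective: idiomatic
-- what changed: Replaced the category-outer/keyword-inner nested scan over seven sets plus a generic-set pass with one flat term->rank dictionary and a single pass over the keywords keeping the minimum matched rank, then indexing a name table.
import Mathlib
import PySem

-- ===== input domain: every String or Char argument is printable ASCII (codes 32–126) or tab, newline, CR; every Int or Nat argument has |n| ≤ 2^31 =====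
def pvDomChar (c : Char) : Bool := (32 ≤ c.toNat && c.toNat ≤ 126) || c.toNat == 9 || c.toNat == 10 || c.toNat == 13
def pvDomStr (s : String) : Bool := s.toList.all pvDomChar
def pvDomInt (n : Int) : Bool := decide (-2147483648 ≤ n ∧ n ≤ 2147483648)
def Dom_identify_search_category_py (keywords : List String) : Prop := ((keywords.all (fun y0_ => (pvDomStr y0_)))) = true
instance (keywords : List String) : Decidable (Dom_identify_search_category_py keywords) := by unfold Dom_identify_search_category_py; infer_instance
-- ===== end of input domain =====

-- B replaces the nested category-by-category scan with one term->rank dictionary and a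
-- single minimum-rank pass over the keywords (idiomatic; same observable behaviour).

-- ===== PORT A =====
-- literal transliteration: scan the categories in dict order, return the first with a
-- matched keyword; then the generic set terms; else "unknown".  (Python set membership
-- is ported as membership in the list of the set literal's elements.)
def identify_search_category_py (keywords : List String) : String :=
  if keywords.any (fun w => (["bangle", "bangles", "kada", "kadaa"] : List String).contains w) then "bangles"
  else if keywords.any (fun w => (["bracelet", "bracelets"] : List String).contains w) then "bracelets"
  else if keywords.any (fun w => (["ring", "rings"] : List String).contains w) then "rings"
  else if keywords.any (fun w => (["necklace", "necklaces", "haram", "choker", "mala"] : List String).contains w) then "necklaces"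
  else if keywords.any (fun w => (["earring", "earrings", "jhumka", "jhumkas", "stud", "studs"] : List String).contains w) then "earrings"
  else if keywords.any (fun w => (["anklet", "anklets", "payal", "paayal"] : List String).contains w) then "anklets"
  else if keywords.any (fun w => (["hair extension", "hair extensions", "hair extn"] : List String).contains w) then "hair_extensions"
  else if keywords.any (fun w => (["set", "sets", "matching", "combo", "pair"] : List String).contains w) then "sets"
  else "unknown"

-- ===== PORT B =====
def pvCatNames : List String :=
  ["bangles", "bracelets", "rings", "necklaces", "earrings", "anklets", "hair_extensions", "sets"]

def pvTermRank : PySem.Dict String Nat := PySem.Dict.mk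
  [("bangle", 0), ("bangles", 0), ("kada", 0), ("kadaa", 0),
   ("bracelet", 1), ("bracelets", 1),
   ("ring", 2), ("rings", 2),
   ("necklace", 3), ("necklaces", 3), ("haram", 3), ("choker", 3), ("mala", 3),
   ("earring", 4), ("earrings", 4), ("jhumka", 4), ("jhumkas", 4), ("stud", 4), ("studs", 4),
   ("anklet", 5), ("anklets", 5), ("payal", 5), ("paayal", 5),
   ("hair extension", 6), ("hair extensions", 6), ("hair extn", 6),
   ("set", 7), ("sets", 7), ("matching", 7), ("combo", 7), ("pair", 7)]

-- one loop iteration: _TERM_RANK.get(w); keep it if it improves the running best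
def pvStep (best : Option Nat) (w : String) : Option Nat :=
  match pvTermRank.get? w, best with
  | some r, none => some r
  | some r, some b => if r < b then some r else some b
  | none, b => b

def identify_search_category_py_alt (keywords : List String) : String :=
  match keywords.foldl pvStep none with
  | some r => pvCatNames.getD r "unknown"
  | none => "unknown"

-- ===== PRECONDITION & SPEC =====
def Spec_identify_search_category_py (keywords : List String) (out : String) : Prop := out = identify_search_category_py_alt keywords
instance (keywords : List String) (out : String) : Decidable (Spec_identify_search_category_py keywords out) := by unfold Spec_identify_search_category_py; infer_instance

-- ===== CLAIM (what is proved, stated in full; the proofs are below) =====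
def Claim_equal_identify_search_category_py : Prop := ∀ (keywords : List String), Dom_identify_search_category_py keywords → Spec_identify_search_category_py keywords (identify_search_category_py keywords)

-- ===== LEMMAS AND PROOFS =====

-- the i-th term list of A (categories 0..6, generic terms at index 7)
def pvTerms : Nat → List String
  | 0 => ["bangle", "bangles", "kada", "kadaa"]
  | 1 => ["bracelet", "bracelets"]
  | 2 => ["ring", "rings"]
  | 3 => ["necklace", "necklaces", "haram", "choker", "mala"]
  | 4 => ["earring", "earrings", "jhumka", "jhumkas", "stud", "studs"]
  | 5 => ["anklet", "anklets", "payal", "paayal"]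
  | 6 => ["hair extension", "hair extensions", "hair extn"]
  | 7 => ["set", "sets", "matching", "combo", "pair"]
  | _ => []

lemma pvRank_some_ranked {w : String} {j : Nat} (h : pvTermRank.get? w = some j) :
    j < 8 ∧ (pvTerms j).contains w = true := by
  have hm := PySem.Dict.mem_items_of_get?_eq_some pvTermRank h
  simp only [pvTermRank, List.mem_cons, List.not_mem_nil, or_false,
    Prod.mk.injEq] at hm
  rcases hm with ⟨rfl, rfl⟩ | ⟨rfl, rfl⟩ | ⟨rfl, rfl⟩ | ⟨rfl, rfl⟩ | ⟨rfl, rfl⟩ | ⟨rfl, rfl⟩ | ⟨rfl, rfl⟩ | ⟨rfl, rfl⟩ | ⟨rfl, rfl⟩ | ⟨rfl, rfl⟩ | ⟨rfl, rfl⟩ | ⟨rfl, rfl⟩ | ⟨rfl, rfl⟩ | ⟨rfl, rfl⟩ | ⟨rfl, rfl⟩ | ⟨rfl, rfl⟩ | ⟨rfl, rfl⟩ | ⟨rfl, rfl⟩ | ⟨rfl, rfl⟩ | ⟨rfl, rfl⟩ | ⟨rfl, rfl⟩ | ⟨rfl, rfl⟩ | ⟨rfl, rfl⟩ | ⟨rfl,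 rfl⟩ | ⟨rfl, rfl⟩ | ⟨rfl, rfl⟩ | ⟨rfl, rfl⟩ | ⟨rfl, rfl⟩ | ⟨rfl, rfl⟩ | ⟨rfl, rfl⟩ | ⟨rfl, rfl⟩ <;> decide

lemma pvRank_of_contains {w : String} {i : Nat} (h : (pvTerms i).contains w = true) :
    ∃ j, j ≤ i ∧ pvTermRank.get? w = some j := by
  match i with
  | 0 =>
    simp only [pvTerms, List.contains_eq_mem, List.mem_cons, List.not_mem_nil, or_false,
      decide_eq_true_eq] at h
    rcases h with rfl | rfl | rfl | rfl <;> exact ⟨0, Nat.le_refl _, by decide⟩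
  | 1 =>
    simp only [pvTerms, List.contains_eq_mem, List.mem_cons, List.not_mem_nil, or_false,
      decide_eq_true_eq] at h
    rcases h with rfl | rfl <;> exact ⟨1, Nat.le_refl _, by decide⟩
  | 2 =>
    simp only [pvTerms, List.contains_eq_mem, List.mem_cons, List.not_mem_nil, or_false,
      decide_eq_true_eq] at h
    rcases h with rfl | rfl <;> exact ⟨2, Nat.le_refl _, by decide⟩
  | 3 =>
    simp only [pvTerms, List.contains_eq_mem, List.mem_cons, List.not_mem_nil, or_false,
      decide_eq_true_eq] at h
    rcases h with rfl | rfl | rfl | rfl | rfl <;> exact ⟨3, Nat.le_refl _, by decide⟩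
  | 4 =>
    simp only [pvTerms, List.contains_eq_mem, List.mem_cons, List.not_mem_nil, or_false,
      decide_eq_true_eq] at h
    rcases h with rfl | rfl | rfl | rfl | rfl | rfl <;> exact ⟨4, Nat.le_refl _, by decide⟩
  | 5 =>
    simp only [pvTerms, List.contains_eq_mem, List.mem_cons, List.not_mem_nil, or_false,
      decide_eq_true_eq] at h
    rcases h with rfl | rfl | rfl | rfl <;> exact ⟨5, Nat.le_refl _, by decide⟩
  | 6 =>
    simp only [pvTerms, List.contains_eq_mem, List.mem_cons, List.not_mem_nil, or_false,
      decide_eq_true_eq] at h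
    rcases h with rfl | rfl | rfl <;> exact ⟨6, Nat.le_refl _, by decide⟩
  | 7 =>
    simp only [pvTerms, List.contains_eq_mem, List.mem_cons, List.not_mem_nil, or_false,
      decide_eq_true_eq] at h
    rcases h with rfl | rfl | rfl | rfl | rfl <;> exact ⟨7, Nat.le_refl _, by decide⟩
  | n + 8 => simp [pvTerms] at h

lemma pvRank_none_not_contains {w : String} (h : pvTermRank.get? w = none) (i : Nat) :
    (pvTerms i).contains w = false := by
  by_contra hc
  obtain ⟨j, _, hj⟩ := pvRank_of_contains (w := w) (i := i) (by simpa using hc)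
  simp [h] at hj

lemma pvFold_none {ks : List String} {acc : Option Nat} (h : ks.foldl pvStep acc = none) :
    acc = none ∧ ∀ w ∈ ks, pvTermRank.get? w = none := by
  induction ks generalizing acc with
  | nil => simpa using h
  | cons x xs ih =>
    simp only [List.foldl_cons] at h
    obtain ⟨hstep, hrest⟩ := ih h
    have hx : pvTermRank.get? x = none ∧ acc = none := by
      rcases hg : pvTermRank.get? x with _ | q <;> rcases hb : acc with _ | b <;>
        simp only [pvStep, hg, hb] at hstep <;>
        first | exact ⟨rfl, rfl⟩ | cases hstep | (split at hstep <;> cases hstep)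
    refine ⟨hx.2, ?_⟩
    intro w hw
    rcases List.mem_cons.mp hw with rfl | hw
    · exact hx.1
    · exact hrest w hw

lemma pvFold_mem {ks : List String} {acc : Option Nat} {r : Nat}
    (h : ks.foldl pvStep acc = some r) :
    acc = some r ∨ ∃ w ∈ ks, pvTermRank.get? w = some r := by
  induction ks generalizing acc with
  | nil => exact .inl (by simpa using h)
  | cons x xs ih =>
    simp only [List.foldl_cons] at h
    rcases ih h with hstep | ⟨w, hw, hr⟩
    · rcases hg : pvTermRank.get? x with _ | q <;> rcases hb : acc with _ | b <;>
        simp only [pvStep, hg, hb] at hstep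
      · exact .inl hstep
      · exact .inl hstep
      · exact .inr ⟨x, List.mem_cons_self, by rw [hg]; exact hstep⟩
      · split at hstep
        · exact .inr ⟨x, List.mem_cons_self, by rw [hg]; exact hstep⟩
        · exact .inl hstep
    · exact .inr ⟨w, List.mem_cons_of_mem _ hw, hr⟩

lemma pvFold_le {ks : List String} {acc : Option Nat} {r : Nat}
    (h : ks.foldl pvStep acc = some r) :
    (∀ b, acc = some b → r ≤ b) ∧ ∀ w ∈ ks, ∀ j, pvTermRank.get? w = some j → r ≤ j := by
  induction ks generalizing acc with
  | nil =>
    refine ⟨fun b hb => ?_, by simp⟩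
    simp only [List.foldl_nil] at h
    rw [hb] at h
    injection h with h'
    omega
  | cons x xs ih =>
    simp only [List.foldl_cons] at h
    obtain ⟨hacc, hrest⟩ := ih h
    have key : (∀ b, acc = some b → r ≤ b) ∧ (∀ j, pvTermRank.get? x = some j → r ≤ j) := by
      refine ⟨?_, ?_⟩
      · intro c hc
        rcases hg : pvTermRank.get? x with _ | q
        · exact hacc c (by simp [pvStep, hg, hc])
        · by_cases hlt : q < c
          · have := hacc q (by simp [pvStep, hg, hc, if_pos hlt]); omega
          · exact hacc c (by simp [pvStep, hg, hc, if_neg hlt])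
      · intro j hj
        rcases hb : acc with _ | b
        · exact hacc j (by simp [pvStep, hj, hb])
        · by_cases hlt : j < b
          · exact hacc j (by simp [pvStep, hj, hb, if_pos hlt])
          · have := hacc b (by simp [pvStep, hj, hb, if_neg hlt]); omega
    refine ⟨key.1, ?_⟩
    intro w hw j hj
    rcases List.mem_cons.mp hw with rfl | hw
    · exact key.2 j hj
    · exact hrest w hw j hj

-- A's i-th any-flag
def pvFlag (ks : List String) (i : Nat) : Bool := ks.any (fun w => (pvTerms i).contains w)

lemma pvFlag_false_of_none {ks : List String}
    (h : ∀ w ∈ ks, pvTermRank.get? w = none) (i : Nat) : pvFlag ks i = false := by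
  simp only [pvFlag, List.any_eq_false]
  intro w hw
  have := pvRank_none_not_contains (h w hw) i
  simp_all

lemma pv_main (ks : List String) :
    identify_search_category_py ks = identify_search_category_py_alt ks := by
  unfold identify_search_category_py_alt
  rcases h : ks.foldl pvStep none with _ | r
  · obtain ⟨-, hall⟩ := pvFold_none h
    have hf := pvFlag_false_of_none hall
    have h0 := hf 0; have h1 := hf 1; have h2 := hf 2; have h3 := hf 3
    have h4 := hf 4; have h5 := hf 5; have h6 := hf 6; have h7 := hf 7
    simp only [pvFlag, pvTerms] at h0 h1 h2 h3 h4 h5 h6 h7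
    simp only [identify_search_category_py]
    rw [h0, h1, h2, h3, h4, h5, h6, h7]
    simp
  · rcases pvFold_mem h with h' | ⟨w, hw, hr⟩
    · cases h'
    obtain ⟨hr8, hcont⟩ := pvRank_some_ranked hr
    have hle := (pvFold_le h).2
    have hflag : pvFlag ks r = true := by
      simp only [pvFlag, List.any_eq_true]
      exact ⟨w, hw, by simp_all⟩
    have hlt : ∀ i, i < r → pvFlag ks i = false := by
      intro i hi
      simp only [pvFlag, List.any_eq_false]
      intro v hv
      by_contra hc
      obtain ⟨j, hji, hj⟩ := pvRank_of_contains (w := v) (i := i) (by simpa using hc)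
      have := hle v hv j hj
      omega
    interval_cases r
    · simp only [pvFlag, pvTerms] at hflag
      simp only [identify_search_category_py]
      rw [hflag]
      simp [pvCatNames]
    · have g0 := hlt 0 (by omega)
      simp only [pvFlag, pvTerms] at hflag g0
      simp only [identify_search_category_py]
      rw [g0, hflag]
      simp [pvCatNames]
    · have g0 := hlt 0 (by omega)
      have g1 := hlt 1 (by omega)
      simp only [pvFlag, pvTerms] at hflag g0 g1
      simp only [identify_search_category_py]
      rw [g0, g1, hflag]
      simp [pvCatNames]
    · have g0 := hlt 0 (by omega)
      have g1 := hlt 1 (by omega)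
      have g2 := hlt 2 (by omega)
      simp only [pvFlag, pvTerms] at hflag g0 g1 g2
      simp only [identify_search_category_py]
      rw [g0, g1, g2, hflag]
      simp [pvCatNames]
    · have g0 := hlt 0 (by omega)
      have g1 := hlt 1 (by omega)
      have g2 := hlt 2 (by omega)
      have g3 := hlt 3 (by omega)
      simp only [pvFlag, pvTerms] at hflag g0 g1 g2 g3
      simp only [identify_search_category_py]
      rw [g0, g1, g2, g3, hflag]
      simp [pvCatNames]
    · have g0 := hlt 0 (by omega)
      have g1 := hlt 1 (by omega)
      have g2 := hlt 2 (by omega)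
      have g3 := hlt 3 (by omega)
      have g4 := hlt 4 (by omega)
      simp only [pvFlag, pvTerms] at hflag g0 g1 g2 g3 g4
      simp only [identify_search_category_py]
      rw [g0, g1, g2, g3, g4, hflag]
      simp [pvCatNames]
    · have g0 := hlt 0 (by omega)
      have g1 := hlt 1 (by omega)
      have g2 := hlt 2 (by omega)
      have g3 := hlt 3 (by omega)
      have g4 := hlt 4 (by omega)
      have g5 := hlt 5 (by omega)
      simp only [pvFlag, pvTerms] at hflag g0 g1 g2 g3 g4 g5
      simp only [identify_search_category_py]
      rw [g0, g1, g2, g3, g4, g5, hflag]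
      simp [pvCatNames]
    · have g0 := hlt 0 (by omega)
      have g1 := hlt 1 (by omega)
      have g2 := hlt 2 (by omega)
      have g3 := hlt 3 (by omega)
      have g4 := hlt 4 (by omega)
      have g5 := hlt 5 (by omega)
      have g6 := hlt 6 (by omega)
      simp only [pvFlag, pvTerms] at hflag g0 g1 g2 g3 g4 g5 g6
      simp only [identify_search_category_py]
      rw [g0, g1, g2, g3, g4, g5, g6, hflag]
      simp [pvCatNames]
-- ===== VERDICT (by name: the statement is the Claim_ definition above) =====
theorem identify_search_category_py_spec : Claim_equal_identify_search_category_py := by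
  intro ks _
  unfold Spec_identify_search_category_py
  exact pv_main ks
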